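-- pv_equiv track=rewrite | github.com/daniel-reich/ubiquitous-fiesta | SYmHGXX2P26xu7JFR_21.py | number_groups
-- ===== SOURCE A (Python) =====
-- def number_groups(group1, group2, group3):
--     data = []
--     for i in group1:
--         if i in group2 and i not in data:
--             data.append(i)
--         if i in group3 and i not in data:
--             data.append(i)
--     for i in group2:
--         if i in group3 and i not in data:
--             data.append(i)
--     data.sort()
--     return data
-- ===== SOURCE B (Python) =====
-- def number_groups(group1, group2, group3):
--     counts = {}
--     for g in (group1, group2, group3):
--         seen = set()
--         for x in g:
--             if x not in seen:
--                 seen.add(x)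
--                 counts[x] = counts.get(x, 0) + 1
--     return sorted(x for x, c in counts.items() if c >= 2)
-- ===== Notes on version B (the rewrite author's own statement) =====
-- stated objective: faster
-- what changed: replaces A's quadratic pairwise-membership loops with a single counting pass: a dict counts in how many groups each value occurs (deduplicated per group) and the values with count >= 2 are sorted
import Mathlib
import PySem

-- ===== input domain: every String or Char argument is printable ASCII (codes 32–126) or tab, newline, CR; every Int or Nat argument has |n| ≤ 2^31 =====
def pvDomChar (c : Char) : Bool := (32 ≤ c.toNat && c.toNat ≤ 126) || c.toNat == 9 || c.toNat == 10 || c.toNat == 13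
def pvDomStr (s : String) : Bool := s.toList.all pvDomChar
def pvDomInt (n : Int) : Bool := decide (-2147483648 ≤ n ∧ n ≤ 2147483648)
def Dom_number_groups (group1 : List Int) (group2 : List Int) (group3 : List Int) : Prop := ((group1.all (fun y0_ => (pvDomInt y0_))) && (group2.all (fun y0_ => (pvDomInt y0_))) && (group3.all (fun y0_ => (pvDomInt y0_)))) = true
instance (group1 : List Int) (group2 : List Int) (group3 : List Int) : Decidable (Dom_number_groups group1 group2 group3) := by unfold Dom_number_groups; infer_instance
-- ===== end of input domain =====

-- B replaces A's quadratic pairwise-membership loops with one counting pass over the three groups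
-- (a dict counting in how many groups each value occurs, threshold >= 2), sorted once (objective: faster).

-- ===== PORT A =====
-- body of A's first for-loop (two conditional appends)
def ngStep1 (group2 : List Int) (group3 : List Int) (acc : List Int) (i : Int) : List Int :=
  let acc1 := if i ∈ group2 ∧ i ∉ acc then acc ++ [i] else acc
  if i ∈ group3 ∧ i ∉ acc1 then acc1 ++ [i] else acc1

-- body of A's second for-loop
def ngStep2 (group3 : List Int) (acc : List Int) (i : Int) : List Int :=
  if i ∈ group3 ∧ i ∉ acc then acc ++ [i] else acc

def number_groups (group1 : List Int) (group2 : List Int) (group3 : List Int) : List Int :=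
  let data := group1.foldl (ngStep1 group2 group3) []
  let data := group2.foldl (ngStep2 group3) data
  PySem.List.sorted data (fun x => x) false

-- ===== PORT B =====
-- body of B's inner loop: 'if x not in seen: seen.add(x); counts[x] = counts.get(x, 0) + 1'
def ngCount (st : PySem.Set Int × PySem.Dict Int Int) (x : Int) : PySem.Set Int × PySem.Dict Int Int :=
  if PySem.Set.contains st.1 x then st
  else (PySem.Set.add st.1 x, st.2.insert x (st.2.getD x 0 + 1))

-- one iteration of B's outer loop 'for g in (group1, group2, group3)' (seen starts empty)
def ngGroup (counts : PySem.Dict Int Int) (g : List Int) : PySem.Dict Int Int :=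
  (g.foldl ngCount (PySem.Set.empty, counts)).2

def number_groups_alt (group1 : List Int) (group2 : List Int) (group3 : List Int) : List Int :=
  let counts := [group1, group2, group3].foldl ngGroup PySem.Dict.empty
  PySem.List.sorted ((counts.items.filter (fun p => 2 ≤ p.2)).map (fun p => p.1)) (fun x => x) false

-- ===== PRECONDITION & SPEC =====
def Spec_number_groups (group1 : List Int) (group2 : List Int) (group3 : List Int) (out : List Int) : Prop := out = number_groups_alt group1 group2 group3
instance (group1 : List Int) (group2 : List Int) (group3 : List Int) (out : List Int) : Decidable (Spec_number_groups group1 group2 group3 out) := by unfold Spec_number_groups; infer_instance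

-- ===== CLAIM =====
def Claim_equal_number_groups : Prop := ∀ (group1 : List Int) (group2 : List Int) (group3 : List Int), Dom_number_groups group1 group2 group3 → Spec_number_groups group1 group2 group3 (number_groups group1 group2 group3)

-- ===== LEMMAS AND PROOFS =====

theorem ngStep1_mem (group2 group3 : List Int) (acc : List Int) (i x : Int) :
    x ∈ ngStep1 group2 group3 acc i ↔ x ∈ acc ∨ (x = i ∧ (i ∈ group2 ∨ i ∈ group3)) := by
  simp only [ngStep1]
  split_ifs with h1 h2 h3 <;> simp_all <;> tauto

theorem ngStep1_nodup (group2 group3 : List Int) (acc : List Int) (i : Int)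
    (h : acc.Nodup) : (ngStep1 group2 group3 acc i).Nodup := by
  simp only [ngStep1]
  split_ifs with h1 h2 h3 <;>
    first
    | assumption
    | (simp_all [List.nodup_append] <;> (intro a ha he; subst he; simp_all))

theorem ngStep2_mem (group3 : List Int) (acc : List Int) (i x : Int) :
    x ∈ ngStep2 group3 acc i ↔ x ∈ acc ∨ (x = i ∧ i ∈ group3) := by
  simp only [ngStep2]
  split_ifs with h1 <;> simp_all

theorem ngStep2_nodup (group3 : List Int) (acc : List Int) (i : Int)
    (h : acc.Nodup) : (ngStep2 group3 acc i).Nodup := by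
  simp only [ngStep2]
  split_ifs with h1 <;>
    first
    | assumption
    | (simp_all [List.nodup_append] <;> (intro a ha he; subst he; simp_all))

theorem loop1_inv (group2 group3 : List Int) :
    ∀ (l acc : List Int), acc.Nodup →
      (l.foldl (ngStep1 group2 group3) acc).Nodup ∧
      (∀ x, x ∈ l.foldl (ngStep1 group2 group3) acc ↔
        x ∈ acc ∨ (x ∈ l ∧ (x ∈ group2 ∨ x ∈ group3))) := by
  intro l
  induction l with
  | nil => intro acc h; simpa using h
  | cons i t ih =>
    intro acc h
    have h' := ngStep1_nodup group2 group3 acc i h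
    obtain ⟨hn, hm⟩ := ih (ngStep1 group2 group3 acc i) h'
    refine ⟨hn, fun x => ?_⟩
    rw [List.foldl_cons] at *
    rw [hm x, ngStep1_mem]
    constructor
    · rintro ((hx | ⟨rfl, hi⟩) | ⟨hx, hg⟩)
      · exact Or.inl hx
      · exact Or.inr ⟨List.mem_cons_self .., hi⟩
      · exact Or.inr ⟨List.mem_cons_of_mem _ hx, hg⟩
    · rintro (hx | ⟨hx, hg⟩)
      · exact Or.inl (Or.inl hx)
      · rcases List.mem_cons.mp hx with rfl | hx
        · exact Or.inl (Or.inr ⟨rfl, hg⟩)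
        · exact Or.inr ⟨hx, hg⟩

theorem loop2_inv (group3 : List Int) :
    ∀ (l acc : List Int), acc.Nodup →
      (l.foldl (ngStep2 group3) acc).Nodup ∧
      (∀ x, x ∈ l.foldl (ngStep2 group3) acc ↔
        x ∈ acc ∨ (x ∈ l ∧ x ∈ group3)) := by
  intro l
  induction l with
  | nil => intro acc h; simpa using h
  | cons i t ih =>
    intro acc h
    have h' := ngStep2_nodup group3 acc i h
    obtain ⟨hn, hm⟩ := ih (ngStep2 group3 acc i) h'
    refine ⟨hn, fun x => ?_⟩
    rw [List.foldl_cons] at *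
    rw [hm x, ngStep2_mem]
    constructor
    · rintro ((hx | ⟨rfl, hi⟩) | ⟨hx, hg⟩)
      · exact Or.inl hx
      · exact Or.inr ⟨List.mem_cons_self .., hi⟩
      · exact Or.inr ⟨List.mem_cons_of_mem _ hx, hg⟩
    · rintro (hx | ⟨hx, hg⟩)
      · exact Or.inl (Or.inl hx)
      · rcases List.mem_cons.mp hx with rfl | hx
        · exact Or.inl (Or.inr ⟨rfl, hg⟩)
        · exact Or.inr ⟨hx, hg⟩

-- B's inner loop: lookup after one group, generalizing the seen set and the incoming dict
theorem ngGroup_get? (l : List Int) :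
    ∀ (seen : PySem.Set Int) (d : PySem.Dict Int Int) (x : Int),
      ((l.foldl ngCount (seen, d)).2).get? x =
        if x ∈ l ∧ x ∉ seen then some (d.getD x 0 + 1) else d.get? x := by
  induction l with
  | nil => intro seen d x; simp
  | cons i t ih =>
    intro seen d x
    rw [List.foldl_cons]
    by_cases hi : i ∈ seen
    · have : ngCount (seen, d) i = (seen, d) := by simp [ngCount, hi]
      rw [this, ih]
      by_cases hx : x = i
      · subst hx; simp [hi]
      · simp [hx]
    · have : ngCount (seen, d) i =
          (PySem.Set.add seen i, d.insert i (d.getD i 0 + 1)) := by simp [ngCount, hi]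
      rw [this, ih]
      by_cases hx : x = i
      · subst hx
        simp [PySem.Set.mem_add, hi, PySem.Dict.get?_insert_self]
      · simp [PySem.Set.mem_add, PySem.Dict.getD_insert, PySem.Dict.get?_insert, hx]

theorem ngGroup_keys_nodup (l : List Int) :
    ∀ (seen : PySem.Set Int) (d : PySem.Dict Int Int), d.keys.Nodup →
      ((l.foldl ngCount (seen, d)).2).keys.Nodup := by
  induction l with
  | nil => intro seen d h; simpa using h
  | cons i t ih =>
    intro seen d h
    rw [List.foldl_cons]
    by_cases hi : i ∈ seen
    · have : ngCount (seen, d) i = (seen, d) := by simp [ngCount, hi]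
      rw [this]; exact ih seen d h
    · have : ngCount (seen, d) i =
          (PySem.Set.add seen i, d.insert i (d.getD i 0 + 1)) := by simp [ngCount, hi]
      rw [this]
      exact ih _ _ (PySem.Dict.nodup_keys_insert _ _ _ h)

-- the count each value ends with: number of the three groups containing it
theorem final_get? (group1 group2 group3 : List Int) (x : Int) :
    ([group1, group2, group3].foldl ngGroup PySem.Dict.empty).get? x =
      if x ∈ group1 ∨ x ∈ group2 ∨ x ∈ group3 then
        some ((if x ∈ group1 then (1:Int) else 0) + (if x ∈ group2 then 1 else 0)
              + (if x ∈ group3 then 1 else 0))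
      else none := by
  show (ngGroup (ngGroup (ngGroup PySem.Dict.empty group1) group2) group3).get? x = _
  unfold ngGroup
  rw [ngGroup_get? group3, PySem.Dict.getD_eq_get?_getD, ngGroup_get? group2,
    PySem.Dict.getD_eq_get?_getD, ngGroup_get? group1]
  have hemp : (PySem.Dict.empty : PySem.Dict Int Int).get? x = none := PySem.Dict.get?_empty x
  have hempD : (PySem.Dict.empty : PySem.Dict Int Int).getD x 0 = 0 := PySem.Dict.getD_empty x 0
  simp only [PySem.Set.empty, List.not_mem_nil, not_false_iff, and_true, hemp, hempD]
  by_cases h1 : x ∈ group1 <;> by_cases h2 : x ∈ group2 <;> by_cases h3 : x ∈ group3 <;>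
    simp [h1, h2, h3]

-- ===== VERDICT =====
theorem number_groups_spec : Claim_equal_number_groups := by
  intro group1 group2 group3 _
  unfold Spec_number_groups number_groups number_groups_alt
  obtain ⟨hn1, hm1⟩ := loop1_inv group2 group3 group1 [] List.nodup_nil
  obtain ⟨hn2, hm2⟩ := loop2_inv group3 group2 _ hn1
  set cnts := [group1, group2, group3].foldl ngGroup PySem.Dict.empty with hcnts
  have hknd : cnts.keys.Nodup := by
    rw [hcnts]
    show ((group3.foldl ngCount (PySem.Set.empty, ngGroup (ngGroup PySem.Dict.empty group1) group2)).2).keys.Nodup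
    apply ngGroup_keys_nodup
    show ((group2.foldl ngCount (PySem.Set.empty, ngGroup PySem.Dict.empty group1)).2).keys.Nodup
    apply ngGroup_keys_nodup
    show ((group1.foldl ngCount (PySem.Set.empty, PySem.Dict.empty)).2).keys.Nodup
    apply ngGroup_keys_nodup
    exact PySem.Dict.nodup_keys_empty
  set L := (cnts.items.filter (fun p => 2 ≤ p.2)).map (fun p => p.1) with hL
  have hLnd : L.Nodup := by
    have hsub : L.Sublist (cnts.items.map (fun p => p.1)) :=
      List.Sublist.map _ List.filter_sublist
    have hk : cnts.keys = cnts.items.map (fun p => p.1) := by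
      simp [PySem.Dict.keys]
    rw [hk] at hknd
    exact hknd.sublist hsub
  have hLmem : ∀ x : Int, x ∈ L ↔
      ((x ∈ group1 ∧ x ∈ group2) ∨ (x ∈ group1 ∧ x ∈ group3) ∨ (x ∈ group2 ∧ x ∈ group3)) := by
    intro x
    rw [hL]
    simp only [List.mem_map, List.mem_filter]
    constructor
    · rintro ⟨⟨k, c⟩, ⟨hmem, hc⟩, rfl⟩
      have hget : cnts.get? k = some c :=
        (PySem.Dict.get?_eq_some_iff_mem_items _ _ _ hknd).mpr hmem
      rw [hcnts, final_get? group1 group2 group3 k] at hget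
      by_cases h1 : k ∈ group1 <;> by_cases h2 : k ∈ group2 <;> by_cases h3 : k ∈ group3 <;>
        simp [h1, h2, h3] at hget hc ⊢ <;> omega
    · intro h
      have hx1 : x ∈ group1 ∨ x ∈ group2 ∨ x ∈ group3 := by tauto
      set c : Int := (if x ∈ group1 then (1:Int) else 0) + (if x ∈ group2 then 1 else 0)
        + (if x ∈ group3 then 1 else 0) with hc
      have hget : cnts.get? x = some c := by
        rw [hcnts, final_get? group1 group2 group3 x, if_pos hx1, hc]
      refine ⟨(x, c), ⟨(PySem.Dict.get?_eq_some_iff_mem_items _ _ _ hknd).mp hget, ?_⟩, rfl⟩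
      simp only [decide_eq_true_eq]
      rw [hc]; split_ifs <;> simp_all
  have hperm : (group2.foldl (ngStep2 group3) (group1.foldl (ngStep1 group2 group3) [])).Perm L := by
    rw [List.perm_ext_iff_of_nodup hn2 hLnd]
    intro x
    rw [hm2 x, hm1 x, hLmem x]
    simp
    tauto
  exact PySem.List.sorted_eq_sorted_of_perm _ _ _ (fun a b h => h) hperm
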